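-- pv_equiv track=rewrite | github.com/AleksOfficial/Codecademy | Advent_of_Code/Advent_of_Code_2019/Day6_2019/Day6_2019.py | return_dictionary
-- ===== SOURCE A (Python) =====
-- def return_dictionary(list_data):
--     orbit_points = {}
--     x = 0
--     for i in list_data:
--
--         try:
--             orbit_points[i[1]].append(i[0])
--             x+=1
--         except:
--             orbit_points[i[1]]=[i[0]]
--             x+=1
--     return orbit_points
-- ===== SOURCE B (Python) =====
-- def return_dictionary(list_data):
--     # distinct second elements in first-occurrence order, then one scan per key
--     keys = list(dict.fromkeys(pair[1] for pair in list_data))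
--     return {k: [pair[0] for pair in list_data if pair[1] == k] for k in keys}
-- ===== Notes on version B (the rewrite author's own statement) =====
-- stated objective: alternative
-- what changed: B first collects the distinct second elements (order-preserving dedup) and then builds each group's value list by a separate comprehension over the input, instead of A's single pass that mutates dict entries under try/except.
import Mathlib
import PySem

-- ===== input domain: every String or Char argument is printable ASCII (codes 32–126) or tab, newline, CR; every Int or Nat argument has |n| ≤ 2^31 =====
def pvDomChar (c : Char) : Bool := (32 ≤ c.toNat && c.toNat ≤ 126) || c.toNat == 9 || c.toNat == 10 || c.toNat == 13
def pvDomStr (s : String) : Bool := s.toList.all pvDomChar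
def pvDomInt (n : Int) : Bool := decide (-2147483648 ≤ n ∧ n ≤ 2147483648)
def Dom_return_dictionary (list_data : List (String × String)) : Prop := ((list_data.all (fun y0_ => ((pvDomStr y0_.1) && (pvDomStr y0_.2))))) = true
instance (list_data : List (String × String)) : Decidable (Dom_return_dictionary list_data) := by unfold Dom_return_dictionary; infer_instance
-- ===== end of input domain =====

-- B replaces A's single try/except dict-accumulation pass by an order-preserving key dedup
-- followed by one filtering scan per key (alternative decomposition, same results).


-- ===== PORT A =====
-- try: orbit_points[i[1]].append(i[0]) / except: orbit_points[i[1]] = [i[0]]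
-- (the counter x is dead local state; the function returns the dict, i.e. its items)
def return_dictionary (list_data : List (String × String)) : List (String × List String) :=
  (list_data.foldl (fun d i =>
      match d.get? i.2 with
      | some v => d.insert i.2 (v ++ [i.1])   -- key present: append (in-place, keeps position)
      | none   => d.insert i.2 [i.1])         -- KeyError branch: fresh entry
    (PySem.Dict.empty)).items

-- ===== PORT B =====
-- keys = list(dict.fromkeys(pair[1] for pair in list_data))  -- first-occurrence dedup = Set.ofList
-- {k: [pair[0] for pair in list_data if pair[1] == k] for k in keys}
def return_dictionary_alt (list_data : List (String × String)) : List (String × List String) :=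
  (PySem.Set.ofList (list_data.map Prod.snd)).map
    (fun k => (k, (list_data.filter (fun pair => pair.2 == k)).map Prod.fst))

-- ===== PRECONDITION & SPEC =====
def Spec_return_dictionary (list_data : List (String × String)) (out : List (String × List String)) : Prop := out = return_dictionary_alt list_data
instance (list_data : List (String × String)) (out : List (String × List String)) : Decidable (Spec_return_dictionary list_data out) := by unfold Spec_return_dictionary; infer_instance

-- ===== CLAIM (what is proved, stated in full; the proofs are below) =====
def Claim_equal_return_dictionary : Prop := ∀ (list_data : List (String × String)), Dom_return_dictionary list_data → Spec_return_dictionary list_data (return_dictionary list_data)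

-- ===== LEMMAS AND PROOFS =====

-- A's try/except step is exactly dict.modify with default []
theorem pvStepEqModify (d : PySem.Dict String (List String)) (i : String × String) :
    (match d.get? i.2 with
      | some v => d.insert i.2 (v ++ [i.1])
      | none   => d.insert i.2 [i.1]) = d.modify i.2 [] (· ++ [i.1]) := by
  rcases h : d.get? i.2 with _ | v <;>
    simp [PySem.Dict.modify, PySem.Dict.getD_eq_get?_getD, h]

theorem pvFoldEq (list_data : List (String × String)) :
    (list_data.foldl (fun d i =>
        match d.get? i.2 with
        | some v => d.insert i.2 (v ++ [i.1])
        | none   => d.insert i.2 [i.1]) (PySem.Dict.empty : PySem.Dict String (List String)))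
    = list_data.foldl (fun d i => d.modify i.2 [] (· ++ [i.1])) PySem.Dict.empty := by
  have hstep : (fun (d : PySem.Dict String (List String)) (i : String × String) =>
      match d.get? i.2 with
      | some v => d.insert i.2 (v ++ [i.1])
      | none   => d.insert i.2 [i.1]) = fun d i => d.modify i.2 [] (· ++ [i.1]) :=
    funext fun d => funext fun i => pvStepEqModify d i
  rw [hstep]

-- ===== VERDICT (by name: the statement is the Claim_ definition above) =====
theorem return_dictionary_spec : Claim_equal_return_dictionary := by
  intro l _
  show return_dictionary l = return_dictionary_alt l
  unfold return_dictionary return_dictionary_alt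
  rw [pvFoldEq]
  set D := l.foldl (fun d i => d.modify i.2 [] (· ++ [i.1]))
            (PySem.Dict.empty : PySem.Dict String (List String)) with hD
  have hnd : D.keys.Nodup := by
    rw [hD]
    exact PySem.Dict.nodup_keys_foldl_modify_key l Prod.snd [] (fun d i => (· ++ [i.1])) _
      PySem.Dict.nodup_keys_empty
  have hkeys : D.keys = PySem.Set.ofList (l.map Prod.snd) := by
    rw [hD, PySem.Dict.keys_foldl_modify_key, PySem.Dict.keys_empty,
      PySem.Set.update_nil_left]
  have hget : ∀ k, D.getD k [] = (l.filter (fun pair => pair.2 == k)).map Prod.fst := by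
    intro k
    have hswap : D = (l.map Prod.swap).foldl
        (fun d p => d.modify p.1 [] (· ++ [p.2])) PySem.Dict.empty := by
      rw [hD, List.foldl_map]
      rfl
    rw [hswap, PySem.Dict.getD_foldl_modify_append]
    simp [List.filter_map, List.map_map, Function.comp_def]
  rw [PySem.Dict.items_eq_map_keys D hnd [], hkeys]
  exact List.map_congr_left (fun k _ => by rw [hget k])
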